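-- pv_equiv track=rewrite | github.com/SkotarenkoEvgeny/Softformance_scool | Modul_3_4/Task_3_4_min.py | sorted_test
-- ===== SOURCE A (Python) =====
-- def direction(start, next):
--     if start <= next:
--         return True
--     else:
--         return False
--
-- def sorted_test(mixed_list, flag=None):
--     while len(mixed_list) >= 2:
--         value = direction(mixed_list[0], mixed_list[1])
--         if value == flag or flag == None:
--             return sorted_test(mixed_list[1:], value)
--         else:
--             return 'not sorted'
--     return 'sorted'
-- ===== SOURCE B (Python) =====
-- def sorted_test(mixed_list, flag=None):
--     # One linear pass with early exit: every adjacent pair's direction must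
--     # equal the expected direction (the given flag, else the first pair's).
--     if len(mixed_list) < 2:
--         return 'sorted'
--     expected = flag if flag is not None else (mixed_list[0] <= mixed_list[1])
--     prev = mixed_list[0]
--     for cur in mixed_list[1:]:
--         if (prev <= cur) != expected:
--             return 'not sorted'
--         prev = cur
--     return 'sorted'
-- ===== Notes on version B (the rewrite author's own statement) =====
-- stated objective: alternative
-- what changed: Replaced the recursion that re-slices the list at every step with a single early-exiting linear pass that checks each adjacent pair's direction against one fixed expected direction.
import Mathlib
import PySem

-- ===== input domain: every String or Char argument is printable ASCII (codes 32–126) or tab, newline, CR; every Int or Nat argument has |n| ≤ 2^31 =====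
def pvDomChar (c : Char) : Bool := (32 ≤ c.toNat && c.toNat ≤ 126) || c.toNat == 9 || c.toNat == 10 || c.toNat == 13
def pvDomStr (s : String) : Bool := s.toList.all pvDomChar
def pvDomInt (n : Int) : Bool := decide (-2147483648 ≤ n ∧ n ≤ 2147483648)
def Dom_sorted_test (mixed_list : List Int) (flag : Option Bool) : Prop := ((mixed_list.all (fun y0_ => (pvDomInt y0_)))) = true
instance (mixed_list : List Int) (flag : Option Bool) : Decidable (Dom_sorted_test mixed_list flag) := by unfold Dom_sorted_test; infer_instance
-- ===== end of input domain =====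

-- B replaces A's slice-per-step recursion with one early-exiting linear pass over adjacent
-- pairs carrying the previous element and a fixed expected direction.
-- ===== PORT A =====
def direction (start next : Int) : Bool :=
  if start ≤ next then true else false

def sorted_test (mixed_list : List Int) (flag : Option Bool) : String :=
  match mixed_list with
  | a :: b :: rest =>
      let value := direction a b
      if flag = some value ∨ flag = none then sorted_test (b :: rest) (some value)
      else "not sorted"
  | _ => "sorted"

-- ===== PORT B =====
-- the for-loop of Source B over mixed_list[1:], carrying prev
def altGo (expected : Bool) (prev : Int) : List Int → String
  | [] => "sorted"
  | cur :: rest =>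
      if decide (prev ≤ cur) != expected then "not sorted"
      else altGo expected cur rest

def sorted_test_alt (mixed_list : List Int) (flag : Option Bool) : String :=
  match mixed_list with
  | [] => "sorted"
  | [_] => "sorted"
  | a :: b :: rest =>
      let expected := flag.getD (decide (a ≤ b))
      altGo expected a (b :: rest)

-- ===== PRECONDITION & SPEC =====
def Spec_sorted_test (mixed_list : List Int) (flag : Option Bool) (out : String) : Prop := out = sorted_test_alt mixed_list flag
instance (mixed_list : List Int) (flag : Option Bool) (out : String) : Decidable (Spec_sorted_test mixed_list flag out) := by unfold Spec_sorted_test; infer_instance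

-- ===== CLAIM (what is proved, stated in full; the proofs are below) =====
def Claim_equal_sorted_test : Prop := ∀ (mixed_list : List Int) (flag : Option Bool), Dom_sorted_test mixed_list flag → Spec_sorted_test mixed_list flag (sorted_test mixed_list flag)

-- ===== LEMMAS AND PROOFS =====

-- ===== VERDICT (by name: the statement is the Claim_ definition above) =====
theorem direction_eq (a b : Int) : direction a b = decide (a ≤ b) := by
  by_cases h : a ≤ b <;> simp [direction, h]

theorem key_go (rest : List Int) : ∀ (b : Int) (v : Bool),
    sorted_test (b :: rest) (some v) = altGo v b rest := by
  induction rest with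
  | nil => intro b v; rfl
  | cons c cs ih =>
    intro b v
    by_cases hv : v = decide (b ≤ c)
    · rw [show sorted_test (b :: c :: cs) (some v)
            = sorted_test (c :: cs) (some (direction b c)) by
          simp [sorted_test, direction_eq, hv]]
      rw [direction_eq, ih]
      subst hv
      simp [altGo]
    · have hA : sorted_test (b :: c :: cs) (some v) = "not sorted" := by
        simp [sorted_test, direction_eq]
        intro h
        exact absurd h hv
      rw [hA]
      simp [altGo, bne_iff_ne, Ne.symm hv]

theorem main_eq : ∀ (xs : List Int) (flag : Option Bool),
    sorted_test xs flag = sorted_test_alt xs flag := by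
  intro xs flag
  match xs with
  | [] => rfl
  | [a] => rfl
  | a :: b :: rest =>
    cases flag with
    | none =>
      rw [show sorted_test (a :: b :: rest) none
            = sorted_test (b :: rest) (some (direction a b)) by
          simp [sorted_test]]
      rw [direction_eq, key_go]
      show altGo (decide (a ≤ b)) b rest = altGo (decide (a ≤ b)) a (b :: rest)
      simp [altGo]
    | some f =>
      by_cases hf : f = direction a b
      · rw [show sorted_test (a :: b :: rest) (some f)
              = sorted_test (b :: rest) (some (direction a b)) by
            simp [sorted_test, hf]]
        rw [direction_eq, key_go]
        subst hf
        rw [direction_eq]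
        show altGo (decide (a ≤ b)) b rest = altGo (decide (a ≤ b)) a (b :: rest)
        simp [altGo]
      · rw [show sorted_test (a :: b :: rest) (some f) = "not sorted" by
            simp [sorted_test, hf]]
        rw [direction_eq] at hf
        show "not sorted" = altGo f a (b :: rest)
        simp [altGo, bne_iff_ne, Ne.symm hf]

theorem sorted_test_spec : Claim_equal_sorted_test := by
  intro xs flag _
  unfold Spec_sorted_test
  exact main_eq xs flag
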